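-- pv_equiv track=rewrite | github.com/shinde2/UVA | 10132/10132.py | check_files
-- ===== SOURCE A (Python) =====
-- from copy import deepcopy
--
-- def solution_found(output, k, n):
--
--     if k == n-1:
--         i = 0
--         while i < n-2:
--             if output[i]+output[i+1] == output[i+2]+output[i+3]:
--                 i += 2
--             else:
--                 return False
--         return True
--     else:
--         return False
--
-- def get_possibilities(files, output, k):
--
--     posiible_files = deepcopy(files)
--
--     for file in output[0:k]:
--         posiible_files.remove(file)
--
--     return posiible_files
--
-- def check_files(files, output, k, n):
--
--     if solution_found(output, k, n):
--         return output
--     else: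
--         k += 1
--         possibilities = get_possibilities(files, output, k)
--         for possibility in possibilities:
--             try:
--                 output[k] = possibility
--             except:
--                 output.append(possibility)
--             solun = check_files(files, output, k, n)
--             if solun:
--                 return solun
-- ===== SOURCE B (Python) =====
-- # B: treats (output, k) as a resumed partial state: if the state is already a complete
-- # valid arrangement it is returned; otherwise B backtracks functionally over the remaining
-- # pool with incremental pair pruning (a branch is abandoned as soon as a completed pair's
-- # concatenation differs from the first pair's, and a resumed prefix whose own pairs already
-- # disagree is rejected outright), instead of A's deepcopy/remove pool rebuilding, in-place
-- # mutation of the shared output list, and full re-check of every complete permutation.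
-- def check_files(files, output, k, n):
--     if k == n - 1 and all(output[i] + output[i + 1] == output[i + 2] + output[i + 3]
--                           for i in range(0, max(n - 2, 0), 2)):
--         return output
--     placed = list(output[:k + 1])
--     pool = list(files)
--     for frag in placed:
--         pool.remove(frag)
--     pairs = [placed[i] + placed[i + 1] for i in range(0, len(placed) - 1, 2)]
--     if not all(p == pairs[0] for p in pairs[1:]):
--         return None  # the resumed prefix is already inconsistent: no extension can succeed
--     target = pairs[0] if pairs else None
--
--     def search(acc, remaining, target):
--         if len(acc) == n:
--             return acc
--         if not remaining:
--             return None
--         for x in remaining: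
--             if len(acc) % 2 == 1:
--                 pair = acc[-1] + x
--                 if target is not None and pair != target:
--                     continue
--                 new_target = pair if target is None else target
--             else:
--                 new_target = target
--             rest = list(remaining)
--             rest.remove(x)
--             res = search(acc + [x], rest, new_target)
--             if res is not None:
--                 return res
--         return None
--
--     return search(placed, pool, target)
-- ===== Notes on version B (the rewrite author's own statement) =====
-- stated objective: faster
-- what changed: A rebuilds the candidate pool with deepcopy/remove at every node, mutates the shared output list in place, and tests the pair-concatenation chain only on complete permutations; B treats (output, k) as a resumed state, rejects an already-inconsistent prefix up front, and backtracks functionally over the remaining pool, pruning a branch as soon as a completed pair's concatenation differs from the first pair's.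
-- outside the precondition, e.g. on check_files([], [], 0, 0): A returns None, B returns []; on check_files(['a', 'b'], ['a', 'x', 'z'], 0, 2): A returns ['a', 'b', 'z'], B returns ['a', 'b']
import Mathlib
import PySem

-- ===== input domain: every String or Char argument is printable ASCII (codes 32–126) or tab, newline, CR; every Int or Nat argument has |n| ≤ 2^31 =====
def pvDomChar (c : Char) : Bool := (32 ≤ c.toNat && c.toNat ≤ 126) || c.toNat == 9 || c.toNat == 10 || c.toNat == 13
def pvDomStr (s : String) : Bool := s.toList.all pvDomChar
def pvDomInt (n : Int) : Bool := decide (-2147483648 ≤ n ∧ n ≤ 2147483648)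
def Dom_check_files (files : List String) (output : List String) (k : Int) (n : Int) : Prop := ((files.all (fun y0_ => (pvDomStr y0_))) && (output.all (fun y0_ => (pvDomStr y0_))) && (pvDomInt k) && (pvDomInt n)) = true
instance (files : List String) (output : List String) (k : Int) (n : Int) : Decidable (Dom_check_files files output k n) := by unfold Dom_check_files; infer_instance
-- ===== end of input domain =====

-- B changes A's exhaustive permutation search (deepcopy/remove pool, shared mutated output,
-- full pair-chain check only at complete permutations) into a pure recursive backtracker that
-- rejects an already-inconsistent resumed prefix up front and prunes as soon as a completed
-- pair's concatenation differs from the first pair's (objective: faster). A mutates its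
-- `output` argument in place; the equivalence proved here is about the RETURN value only.

-- ===== PORT A =====
-- while-loop of solution_found: i advances by 2 while i < n-2; the Nat fuel is a totality
-- guard only (the caller passes (n-2).toNat, which exceeds the iteration count, and fuel 0
-- implies the loop guard is already false); an out-of-range access is Python's IndexError
-- (excluded by Pre_), rendered here as an immediate false.
def solLoop (output : List String) (n : Int) : Nat → Int → Bool
  | 0, _ => true
  | fuel+1, i =>
    if i < n - 2 then
      match PySem.List.pyGet? output i, PySem.List.pyGet? output (i+1),
            PySem.List.pyGet? output (i+2), PySem.List.pyGet? output (i+3) with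
      | some a, some b, some c, some d =>
          if a ++ b == c ++ d then solLoop output n fuel (i+2) else false
      | _, _, _, _ => false   -- IndexError in Python (outside Pre_)
    else true

def solution_found (output : List String) (k : Int) (n : Int) : Bool :=
  if k == n - 1 then solLoop output n (n-2).toNat 0 else false

-- get_possibilities: copy files, remove each element of output[0:k]; none = ValueError (outside Pre_)
def get_possibilities (files output : List String) (k : Int) : Option (List String) :=
  (PySem.List.slice output (some 0) (some k)).foldl
    (fun acc f => acc.bind (fun l => PySem.List.remove? l f)) (some files)

-- `try: output[k] = p  except: output.append(p)`
def pyAssignOrAppend (output : List String) (k : Int) (p : String) : List String :=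
  match PySem.List.pySet? output k p with
  | some l => l
  | none => output ++ [p]

-- body of the `for possibility in possibilities` loop: once a (truthy) solution has been
-- found the remaining candidates are skipped (Python's early `return`); otherwise recurse
-- (`rec`) on the mutated output; a falsy result (None or []) lets the loop continue
def checkStep (rec : List String → Int → Option (List String) × List String) (k : Int) :
    (Option (List String) × List String) → String → Option (List String) × List String
  | (some l, output), _ => (some l, output)
  | (none, output), p =>
    let r := rec (pyAssignOrAppend output k p) k
    match r.1 with
    | some l => if l.isEmpty then (none, r.2) else (some l, r.2)
    | none => (none, r.2)

-- the recursion of check_files, threading the mutated output; the Nat fuel bounds the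
-- recursion depth (a totality guard only: on every input where Python terminates normally
-- the chosen fuel exceeds the recursion depth).
def checkGo (files : List String) (n : Int) : Nat → List String → Int → Option (List String) × List String
  | 0, output, _ => (none, output)
  | fuel+1, output, k =>
    if solution_found output k n then (some output, output)
    else
      match get_possibilities files output (k+1) with
      | none => (none, output)    -- ValueError in Python (outside Pre_)
      | some poss =>
        poss.foldl (checkStep (fun o j => checkGo files n fuel o j) (k+1)) (none, output)

def check_files (files : List String) (output : List String) (k : Int) (n : Int) : Option (List String) :=
  (checkGo files n (k.natAbs + 2 * files.length + output.length + 4) output k).1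

-- ===== PORT B =====
-- the `all(output[i]+output[i+1] == output[i+2]+output[i+3] for i in range(0, max(n-2,0), 2))`
-- guard of Source B, evaluated with Python's short-circuit order (same fuel convention as
-- solLoop); an out-of-range access is Python's IndexError (outside Pre_), rendered false.
def bChainLoop (output : List String) (n : Int) : Nat → Int → Bool
  | 0, _ => true
  | fuel+1, i =>
    if i < n - 2 then
      match PySem.List.pyGet? output i, PySem.List.pyGet? output (i+1),
            PySem.List.pyGet? output (i+2), PySem.List.pyGet? output (i+3) with
      | some a, some b, some c, some d =>
          if a ++ b == c ++ d then bChainLoop output n fuel (i+2) else false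
      | _, _, _, _ => false   -- IndexError in Python (outside Pre_)
    else true

-- `pool = list(files); for frag in placed: pool.remove(frag)`; none = ValueError (outside Pre_)
def bRemoveAll (fs : List String) (acc : List String) : Option (List String) :=
  acc.foldl (fun acc0 f => acc0.bind (fun l => PySem.List.remove? l f)) (some fs)

-- `[placed[i] + placed[i+1] for i in range(0, len(placed)-1, 2)]`: the concatenations of
-- consecutive disjoint pairs (a trailing odd element is ignored)
def pairsOf : List String → List String
  | a :: b :: rest => (a ++ b) :: pairsOf rest
  | _ => []

-- `all(p == pairs[0] for p in pairs[1:])` (True on the empty list, pairs[0] never evaluated then)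
def allEqB : List String → Bool
  | [] => true
  | t :: ps => ps.all (· == t)

-- body of B's `for x in remaining` loop: a found solution is returned past the remaining
-- candidates (early return); `decision` is none exactly when B `continue`s (pruning)
def searchStep (rec : List String → List String → Option String → Option (List String))
    (acc remaining : List String) (target : Option String) :
    Option (List String) → String → Option (List String)
  | some res, _ => some res
  | none, x =>
    let decision : Option (Option String) :=
      if acc.length % 2 == 1 then
        let pair := PySem.List.pyGetD acc (-1) "" ++ x
        match target with
        | some t => if pair == t then some (some t) else none
        | none => some (some pair)
      else some target
    match decision with
    | none => none
    | some nt =>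
      match PySem.List.remove? remaining x with
      | none => none   -- unreachable: x ∈ remaining
      | some rest => rec (acc ++ [x]) rest nt

-- B's search(acc, remaining, target); the Nat fuel is a recursion depth guard only
-- (depth ≤ |remaining|).
def searchB (n : Int) : Nat → List String → List String → Option String → Option (List String)
  | 0, _, _, _ => none
  | fuel+1, acc, remaining, target =>
    if (acc.length : Int) == n then some acc
    else if remaining.isEmpty then none
    else remaining.foldl
      (searchStep (fun a r t => searchB n fuel a r t) acc remaining target) none

def check_files_alt (files : List String) (output : List String) (k : Int) (n : Int) : Option (List String) :=
  if (k == n - 1) && bChainLoop output n (n-2).toNat 0 then some output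
  else
    let placed := PySem.List.slice output (some 0) (some (k+1))
    match bRemoveAll files placed with
    | none => none   -- ValueError in Python (outside Pre_)
    | some pool =>
      let pairs := pairsOf placed
      if !(allEqB pairs) then none  -- resumed prefix already inconsistent
      else searchB n (pool.length + 1) placed pool pairs.head?

-- ===== PRECONDITION & SPEC =====
-- the pair-concatenation chain A's solution_found checks, as a data property of output
-- (all checked indices in range, all checked pairs equal)
def ChainAll (output : List String) (n : Int) : Prop :=
  n ≤ 2 ∨ (3 ≤ n ∧ (if (2 : Int) ∣ n then n else n + 1) ≤ (output.length : Int) ∧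
    ∀ i ∈ PySem.List.pyRange 0 (n-2) 2,
      PySem.List.pyGetD output i "" ++ PySem.List.pyGetD output (i+1) ""
        = PySem.List.pyGetD output (i+2) "" ++ PySem.List.pyGetD output (i+3) "")

-- multiset inclusion (list.remove never raises when removing xs from fs)
def MSub (xs fs : List String) : Prop := ∀ x ∈ xs, xs.count x ≤ fs.count x

-- Pre_ covers (1) every well-formed search state — a prefix drawn from files in slots 0..k,
-- k+1 ≤ len(output) ≤ n, n = len(files) even — i.e. the top-level call and all resumed
-- partial states; (2) a state already complete and valid (k = n-1 and the pair chain holds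
-- in range) — A returns output as given; (3)/(4) states from which no solution is reachable
-- (n outside the reachable slot window, or an already-exhausted pool) — A returns None.
-- Excluded are only the inputs where A raises (ValueError when the prefix is not drawn from
-- files, IndexError for odd n or when slot k lies beyond output) and the calls with
-- n < len(files) or len(output) > n, whose returned list carries leftover entries beyond
-- index n-1 from abandoned branches of the in-place mutated shared output — an artefact of
-- A's mutation that no specification would retain.
def Pre_check_files (files : List String) (output : List String) (k : Int) (n : Int) : Prop :=
  (-1 ≤ k ∧ k + 1 ≤ (output.length : Int) ∧ (output.length : Int) ≤ n ∧
      n = (files.length : Int) ∧ (2 : Int) ∣ n ∧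
      MSub (PySem.List.slice output (some 0) (some (k+1))) files)
  ∨ (k = n - 1 ∧ ChainAll output n)
  ∨ (-1 ≤ k ∧ k + 1 ≤ (output.length : Int) ∧
      MSub (PySem.List.slice output (some 0) (some (k+1))) files ∧
      (n ≤ k ∨ (k + 2 ≤ n ∧ (files.length : Int) + 1 ≤ n)))
  ∨ (-1 ≤ k ∧ MSub (PySem.List.slice output (some 0) (some (k+1))) files ∧
      (PySem.List.slice output (some 0) (some (k+1))).length = files.length ∧
      n ≠ k + 1 ∧ n ≠ ((PySem.List.slice output (some 0) (some (k+1))).length : Int))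
instance (files : List String) (output : List String) (k : Int) (n : Int) : Decidable (Pre_check_files files output k n) := by unfold Pre_check_files ChainAll MSub; infer_instance

def pvWitness_check_files : List String × List String × Int × Int := (["ab", "c", "a", "bc"], ["ab", "c"], 1, 4)

def Spec_check_files (files : List String) (output : List String) (k : Int) (n : Int) (out : Option (List String)) : Prop := out = check_files_alt files output k n
instance (files : List String) (output : List String) (k : Int) (n : Int) (out : Option (List String)) : Decidable (Spec_check_files files output k n out) := by unfold Spec_check_files; infer_instance

-- ===== CLAIM (what is proved, stated in full; the proofs are below) =====
def Claim_equal_check_files : Prop := ∀ (files : List String) (output : List String) (k : Int) (n : Int), Dom_check_files files output k n → Pre_check_files files output k n → Spec_check_files files output k n (check_files files output k n)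

-- ===== LEMMAS AND PROOFS =====

-- `placed[0] + placed[1] if len(placed) >= 2 else None` = (pairsOf placed).head?
def bInitTarget : List String → Option String
  | a :: b :: _ => some (a ++ b)
  | _ => none

lemma head_pairsOf : ∀ (acc : List String), (pairsOf acc).head? = bInitTarget acc := by
  intro acc
  match acc with
  | [] => rfl
  | [a] => rfl
  | a :: b :: l => rfl

-- all adjacent elements equal (the chain solution_found's while-loop checks)
def adjPairs : List String → Bool
  | p :: q :: r => (p == q) && adjPairs (q :: r)
  | _ => true

lemma adjPairs_eq_allEqB : ∀ ps, adjPairs ps = allEqB ps := by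
  intro ps
  induction ps with
  | nil => rfl
  | cons p t ih =>
    cases t with
    | nil => rfl
    | cons q r =>
      by_cases h : p = q
      · subst h
        simp [adjPairs, allEqB] at ih ⊢
        exact ih
      · have h1 : (p == q) = false := by simp [h]
        have h2 : (q == p) = false := by simp [Ne.symm h]
        simp [adjPairs, allEqB, h1, h2]

lemma allEqB_append_false (ps qs : List String) (h : allEqB ps = false) :
    allEqB (ps ++ qs) = false := by
  cases ps with
  | nil => simp [allEqB] at h
  | cons t ps' =>
    simp only [allEqB] at h
    simp only [List.cons_append, allEqB, List.all_append, h, Bool.false_and]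

lemma pairsOf_append_even : ∀ (u l : List String), u.length % 2 = 0 →
    pairsOf (u ++ l) = pairsOf u ++ pairsOf l := by
  intro u
  induction u using pairsOf.induct with
  | case1 a b rest ih =>
    intro l h
    simp only [List.length_cons] at h
    simp only [List.cons_append, pairsOf, ih l (by omega)]
  | case2 u h1 =>
    intro l hl
    cases u with
    | nil => simp [pairsOf]
    | cons a t =>
      cases t with
      | nil => simp at hl
      | cons b r => exact absurd (h1 a b r rfl) (by simp)

lemma pairsOf_snoc_even (acc : List String) (x : String) (h : acc.length % 2 = 0) :
    pairsOf (acc ++ [x]) = pairsOf acc := by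
  rw [pairsOf_append_even acc [x] h]
  simp [pairsOf]

lemma pairsOf_snoc_odd : ∀ (acc : List String) (x : String) (h : acc ≠ []),
    acc.length % 2 = 1 → pairsOf (acc ++ [x]) = pairsOf acc ++ [acc.getLast h ++ x] := by
  intro acc
  induction acc using pairsOf.induct with
  | case1 a b rest ih =>
    intro x h hodd
    simp only [List.length_cons] at hodd
    have hrest : rest ≠ [] := by
      intro he; subst he; simp at hodd
    simp only [List.cons_append, pairsOf, ih x hrest (by omega)]
    rw [List.getLast_cons (by simp), List.getLast_cons hrest]
  | case2 u h1 =>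
    intro x h hodd
    cases u with
    | nil => exact absurd rfl h
    | cons a t =>
      cases t with
      | nil => simp [pairsOf]
      | cons b r => exact absurd (h1 a b r rfl) (by simp)

lemma bInitTarget_snoc (acc : List String) (x : String) (h : acc.length ≠ 1) :
    bInitTarget (acc ++ [x]) = bInitTarget acc := by
  match acc with
  | [] => rfl
  | [a] => simp at h
  | a :: b :: rest => rfl

lemma solLoop_eq : ∀ (fuel : Nat) (w u : List String),
    (u.length + w.length) % 2 = 0 → u.length % 2 = 0 →
    (w.length : Int) - 2 ≤ 2 * (fuel : Int) →
    solLoop (u ++ w) ((u.length + w.length : Nat) : Int) fuel ((u.length : Nat) : Int)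
      = adjPairs (pairsOf w) := by
  intro fuel
  induction fuel with
  | zero =>
    intro w u h2 hu hf
    rcases w with _ | ⟨a, _ | ⟨b, _ | ⟨c, w'⟩⟩⟩
    · rfl
    · rfl
    · rfl
    · exfalso; simp at hf; omega
  | succ f ih =>
    intro w u h2 hu hf
    by_cases hlt : 2 < w.length
    · match w, hlt with
      | [a, b, c], hlt => simp at h2 hu; omega
      | a :: b :: c :: d :: rest, hlt =>
        rw [solLoop, if_pos (by push_cast; simp; omega)]
        have g0 : PySem.List.pyGet? (u ++ a :: b :: c :: d :: rest) ((u.length : Nat) : Int)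
            = some a := PySem.List.pyGet?_append_length _ _ _
        have e1 : u ++ a :: b :: c :: d :: rest = (u ++ [a]) ++ (b :: c :: d :: rest) := by simp
        have e2 : u ++ a :: b :: c :: d :: rest = (u ++ [a, b]) ++ (c :: d :: rest) := by simp
        have e3 : u ++ a :: b :: c :: d :: rest = (u ++ [a, b, c]) ++ (d :: rest) := by simp
        have g1 : PySem.List.pyGet? (u ++ a :: b :: c :: d :: rest) (((u.length : Nat) : Int) + 1)
            = some b := by
          rw [show (((u.length : Nat) : Int) + 1) = (((u ++ [a]).length : Nat) : Int) by simp, e1]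
          exact PySem.List.pyGet?_append_length _ _ _
        have g2 : PySem.List.pyGet? (u ++ a :: b :: c :: d :: rest) (((u.length : Nat) : Int) + 2)
            = some c := by
          rw [show (((u.length : Nat) : Int) + 2) = (((u ++ [a, b]).length : Nat) : Int) by simp, e2]
          exact PySem.List.pyGet?_append_length _ _ _
        have g3 : PySem.List.pyGet? (u ++ a :: b :: c :: d :: rest) (((u.length : Nat) : Int) + 3)
            = some d := by
          rw [show (((u.length : Nat) : Int) + 3) = (((u ++ [a, b, c]).length : Nat) : Int) by simp, e3]
          exact PySem.List.pyGet?_append_length _ _ _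
        rw [g0, g1, g2, g3]
        by_cases hab : (a ++ b == c ++ d) = true
        · simp only [hab, if_true]
          have ihr := ih (c :: d :: rest) (u ++ [a, b])
            (by simp at h2 ⊢; omega) (by simp at hu ⊢; omega)
            (by simp at hf ⊢; omega)
          have hsame : ((u.length + (a :: b :: c :: d :: rest).length : Nat) : Int)
              = (((u ++ [a, b]).length + (c :: d :: rest).length : Nat) : Int) := by
            push_cast; simp; ring
          have hidx : (((u.length : Nat) : Int) + 2) = (((u ++ [a, b]).length : Nat) : Int) := by
            simp
          rw [hsame, hidx, e2, ihr]
          simp only [pairsOf, adjPairs, hab, Bool.true_and]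
        · simp only [adjPairs, pairsOf]
          simp [hab]
    · rw [solLoop, if_neg (by push_cast; simp; omega)]
      rcases w with _ | ⟨a, _ | ⟨b, _ | ⟨c, w'⟩⟩⟩
      · rfl
      · rfl
      · rfl
      · exact absurd (by simp) hlt

lemma bRemoveAll_snoc (fs acc : List String) (x : String) :
    bRemoveAll fs (acc ++ [x]) = (bRemoveAll fs acc).bind (fun l => PySem.List.remove? l x) := by
  simp [bRemoveAll, List.foldl_append]

lemma get_possibilities_eq (files acc tail : List String) :
    get_possibilities files (acc ++ tail) ((acc.length : Nat) : Int) = bRemoveAll files acc := by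
  unfold get_possibilities bRemoveAll
  rw [PySem.List.slice_zero_start, PySem.List.slice_to_natCast, List.take_left]

lemma pyAssignOrAppend_eq : ∀ (acc tail : List String) (x : String),
    pyAssignOrAppend (acc ++ tail) ((acc.length : Nat) : Int) x
      = acc ++ [x] ++ tail.tail := by
  intro acc tail x
  unfold pyAssignOrAppend
  cases tail with
  | nil =>
    rw [show PySem.List.pySet? (acc ++ ([] : List String)) ((acc.length : Nat) : Int) x = none by
      rw [PySem.List.pySet?_eq_none_iff]; simp [PySem.Raise.InRange]]
    simp
  | cons t ts =>
    rw [PySem.List.pySet?_natCast _ _ _ (by simp)]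
    rw [List.set_append_right _ _ (by simp)]
    simp

lemma foldl_checkStep_some (rec : List String → Int → Option (List String) × List String)
    (k : Int) : ∀ (ys : List String) (l o : List String),
    ys.foldl (checkStep rec k) (some l, o) = (some l, o) := by
  intro ys
  induction ys with
  | nil => intro l o; rfl
  | cons x xs ih =>
    intro l o
    rw [List.foldl_cons, show checkStep rec k (some l, o) x = (some l, o) from rfl]
    exact ih l o

lemma foldl_searchStep_some (rec : List String → List String → Option String → Option (List String))
    (acc rem : List String) (t : Option String) : ∀ (ys : List String) (l : List String),
    ys.foldl (searchStep rec acc rem t) (some l) = some l := by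
  intro ys
  induction ys with
  | nil => intro l; rfl
  | cons x xs ih =>
    intro l
    rw [List.foldl_cons, show searchStep rec acc rem t (some l) x = some l from rfl]
    exact ih l

lemma searchB_some_len : ∀ (fuel : Nat) (n : Int) (acc rem : List String) (t : Option String)
    (l : List String), searchB n fuel acc rem t = some l → (l.length : Int) = n := by
  intro fuel
  induction fuel with
  | zero => intro n acc rem t l h; simp [searchB] at h
  | succ f ih =>
    intro n acc rem t l h
    rw [searchB] at h
    by_cases hb : ((acc.length : Int) == n) = true
    · rw [if_pos hb] at h
      obtain rfl : acc = l := by injection h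
      exact beq_iff_eq.mp hb
    · rw [if_neg hb] at h
      by_cases he : rem.isEmpty
      · rw [if_pos he] at h; simp at h
      · rw [if_neg he] at h
        have loop : ∀ (ys : List String), ys.foldl (searchStep (fun a r t' => searchB n f a r t') acc rem t) none
            = some l → (l.length : Int) = n := by
          intro ys
          induction ys with
          | nil => intro hh; simp at hh
          | cons x xs ihys =>
            intro hh
            rw [List.foldl_cons] at hh
            simp only [searchStep] at hh
            split at hh
            · exact ihys hh
            · rename_i nt _
              split at hh
              · exact ihys hh
              · rename_i rest hrem
                rcases hsb : searchB n f (acc ++ [x]) rest nt with _ | res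
                · rw [hsb] at hh
                  exact ihys hh
                · rw [hsb, foldl_searchStep_some] at hh
                  injection hh with hh2
                  subst hh2
                  exact ih n (acc ++ [x]) rest nt _ hsb
        exact loop rem h

lemma searchB_none_gt : ∀ (fuel : Nat) (n : Int) (acc rem : List String) (t : Option String),
    n < (acc.length : Int) → searchB n fuel acc rem t = none := by
  intro fuel
  induction fuel with
  | zero => intro n acc rem t _; simp [searchB]
  | succ f ih =>
    intro n acc rem t hlt
    rw [searchB]
    rw [if_neg (by simp only [beq_iff_eq]; omega)]
    by_cases he : rem.isEmpty
    · rw [if_pos he]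
    · rw [if_neg he]
      have loop : ∀ (ys : List String), ys.foldl (searchStep (fun a r t' => searchB n f a r t') acc rem t) none
          = none := by
        intro ys
        induction ys with
        | nil => rfl
        | cons x xs ihys =>
          rw [List.foldl_cons]
          simp only [searchStep]
          split
          · exact ihys
          · split
            · exact ihys
            · rw [ih n (acc ++ [x]) _ _ (by simp; omega)]
              exact ihys
      exact loop rem

lemma searchB_none_sum : ∀ (fuel : Nat) (n : Int) (acc rem : List String) (t : Option String),
    ((acc.length : Int) + (rem.length : Int)) < n → searchB n fuel acc rem t = none := by
  intro fuel
  induction fuel with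
  | zero => intro n acc rem t _; simp [searchB]
  | succ f ih =>
    intro n acc rem t hlt
    rw [searchB]
    rw [if_neg (by simp only [beq_iff_eq]; omega)]
    by_cases he : rem.isEmpty
    · rw [if_pos he]
    · rw [if_neg he]
      have loop : ∀ (ys : List String), ys.foldl (searchStep (fun a r t' => searchB n f a r t') acc rem t) none
          = none := by
        intro ys
        induction ys with
        | nil => rfl
        | cons x xs ihys =>
          rw [List.foldl_cons]
          simp only [searchStep]
          split
          · exact ihys
          · split
            · exact ihys
            · rename_i nt _ rest hrem
              have hx2 : x ∈ rem := by
                by_contra hx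
                rw [(PySem.List.remove?_eq_none_iff rem x).mpr hx] at hrem
                simp at hrem
              have hrest2 : rem.erase x = rest := by
                rw [PySem.List.remove?_eq_some_erase rem x hx2] at hrem
                injection hrem
              have hlenrest : rest.length = rem.length - 1 := by
                rw [← hrest2]; exact List.length_erase_of_mem hx2
              have hrl : 1 ≤ rem.length := List.length_pos_of_mem hx2
              rw [ih n (acc ++ [x]) rest _ (by simp; omega)]
              exact ihys
      exact loop rem

lemma deadGo (files : List String) : ∀ (fuelA : Nat) (acc rem tail : List String),
    bRemoveAll files acc = some rem →
    acc.length + rem.length = files.length →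
    acc.length + tail.length ≤ files.length →
    2 ∣ files.length →
    allEqB (pairsOf acc) = false →
    rem.length + 1 ≤ fuelA →
    ∃ tail', checkGo files (files.length : Int) fuelA (acc ++ tail) ((acc.length : Int) - 1)
        = (none, acc ++ tail') ∧ acc.length + tail'.length ≤ files.length := by
  intro fuelA
  induction fuelA with
  | zero => intro acc rem tail _ _ _ _ _ hfuel; omega
  | succ f ih =>
    intro acc rem tail hrf hlen htail hdvd hbad hfuel
    have hsf : solution_found (acc ++ tail) ((acc.length : Int) - 1) (files.length : Int)
        = false := by
      by_cases hleaf : acc.length = files.length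
      · have htail0 : tail = [] := by
          rw [hleaf] at hlen
          exact List.eq_nil_of_length_eq_zero (by omega)
        subst htail0
        unfold solution_found
        rw [if_pos (by rw [hleaf]; simp)]
        have hs := solLoop_eq (((files.length : Int) - 2).toNat) acc []
          (by simp; omega) (by simp) (by omega)
        simp only [List.nil_append, List.length_nil, Nat.zero_add, Nat.cast_zero] at hs
        simp only [List.append_nil]
        rw [← hleaf] at *
        rw [hs, adjPairs_eq_allEqB]
        exact hbad
      · unfold solution_found
        rw [if_neg (by simp only [beq_iff_eq]; intro hh; apply hleaf; omega)]
    rw [checkGo, hsf]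
    simp only [Bool.false_eq_true, if_false]
    rw [show ((acc.length : Int) - 1 + 1) = ((acc.length : Nat) : Int) by ring]
    rw [get_possibilities_eq, hrf]
    have loop : ∀ (ys tl : List String), (∀ x ∈ ys, x ∈ rem) →
        acc.length + tl.length ≤ files.length →
        ∃ tail', ys.foldl (checkStep (fun o j => checkGo files (files.length : Int) f o j)
              ((acc.length : Nat) : Int)) (none, acc ++ tl)
            = (none, acc ++ tail') ∧ acc.length + tail'.length ≤ files.length := by
      intro ys
      induction ys with
      | nil => intro tl _ htl; exact ⟨tl, rfl, htl⟩
      | cons x xs ihys =>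
        intro tl hmem htl
        have hx : x ∈ rem := hmem x List.mem_cons_self
        have hr1 : 1 ≤ rem.length := List.length_pos_of_mem hx
        have hbad' : allEqB (pairsOf (acc ++ [x])) = false := by
          by_cases hpar : acc.length % 2 = 0
          · rw [pairsOf_snoc_even acc x hpar]; exact hbad
          · have hne : acc ≠ [] := by intro he; subst he; simp at hpar
            rw [pairsOf_snoc_odd acc x hne (by omega)]
            exact allEqB_append_false _ _ hbad
        have hchild := ih (acc ++ [x]) (rem.erase x) tl.tail
          (by rw [bRemoveAll_snoc, hrf]
              simp only [Option.bind_some]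
              exact PySem.List.remove?_eq_some_erase rem x hx)
          (by simp; rw [List.length_erase_of_mem hx]; omega)
          (by simp only [List.length_append, List.length_singleton, List.length_tail]
              cases tl with
              | nil => simp; omega
              | cons a b => simp at htl ⊢; omega)
          hdvd hbad'
          (by rw [List.length_erase_of_mem hx]; omega)
        obtain ⟨tailC, hC, hCb⟩ := hchild
        rw [List.foldl_cons]
        simp only [checkStep]
        rw [pyAssignOrAppend_eq]
        rw [show acc ++ [x] ++ tl.tail = (acc ++ [x]) ++ tl.tail from rfl]
        rw [show ((acc.length : Nat) : Int) = (((acc ++ [x]).length : Int) - 1) by simp]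
        rw [hC]
        simp only []
        rw [show (((acc ++ [x]).length : Int) - 1) = ((acc.length : Nat) : Int) by simp]
        rw [show (acc ++ [x]) ++ tailC = acc ++ ([x] ++ tailC) by simp]
        exact ihys ([x] ++ tailC) (fun y hy => hmem y (List.mem_cons_of_mem x hy))
          (by simp at hCb ⊢; omega)
    exact loop rem tail (fun x hx => hx) htail

lemma pairsOf_head_of_bInitTarget (acc : List String) (t : String)
    (h : bInitTarget acc = some t) : ∃ ps', pairsOf acc = t :: ps' := by
  match acc with
  | [] => simp [bInitTarget] at h
  | [a] => simp [bInitTarget] at h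
  | a :: b :: l =>
    refine ⟨pairsOf l, ?_⟩
    simp only [bInitTarget] at h
    injection h with h
    simp [pairsOf, h]

lemma liveGo (files : List String) : ∀ (fuelB fuelA : Nat) (acc rem tail : List String),
    bRemoveAll files acc = some rem →
    acc.length + rem.length = files.length →
    acc.length + tail.length ≤ files.length →
    2 ∣ files.length →
    allEqB (pairsOf acc) = true →
    rem.length + 1 ≤ fuelA → rem.length + 1 ≤ fuelB →
    ∃ tail', checkGo files (files.length : Int) fuelA (acc ++ tail) ((acc.length : Int) - 1)
        = (searchB (files.length : Int) fuelB acc rem (bInitTarget acc), acc ++ tail')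
      ∧ acc.length + tail'.length ≤ files.length := by
  intro fuelB
  induction fuelB with
  | zero => intro fuelA acc rem tail _ _ _ _ _ _ hfB; omega
  | succ fB ih =>
    intro fuelA acc rem tail hrf hlen htail hdvd hgood hfA hfB
    cases fuelA with
    | zero => omega
    | succ fA =>
    rw [checkGo, searchB]
    by_cases hleaf : rem.isEmpty
    · have hrem0 : rem = [] := by simpa [List.isEmpty_iff] using hleaf
      subst hrem0
      have hacc : acc.length = files.length := by simpa using hlen
      have htail0 : tail = [] := by
        rw [hacc] at hlen
        exact List.eq_nil_of_length_eq_zero (by omega)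
      subst htail0
      rw [if_pos (show ((acc.length : Int) == (files.length : Int)) = true by
        simp [hacc])]
      have hsf : solution_found (acc ++ []) ((acc.length : Int) - 1) (files.length : Int)
          = true := by
        unfold solution_found
        rw [if_pos (by rw [hacc]; simp)]
        have hs := solLoop_eq (((files.length : Int) - 2).toNat) acc []
          (by simp; omega) (by simp) (by omega)
        simp only [List.nil_append, List.length_nil, Nat.zero_add, Nat.cast_zero] at hs
        simp only [List.append_nil]
        rw [← hacc] at *
        rw [hs, adjPairs_eq_allEqB]
        exact hgood
      rw [if_pos hsf]
      exact ⟨[], by simp, by simp; omega⟩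
    · have hrne : rem ≠ [] := by simpa [List.isEmpty_iff] using hleaf
      have hr1 : 1 ≤ rem.length := List.length_pos_iff.mpr hrne
      have hlt : acc.length < files.length := by omega
      rw [if_neg (show ¬ ((acc.length : Int) == (files.length : Int)) = true by
        simp only [beq_iff_eq]; intro hh; omega)]
      rw [if_neg hleaf]
      have hsf : solution_found (acc ++ tail) ((acc.length : Int) - 1) (files.length : Int)
          = false := by
        unfold solution_found
        rw [if_neg (by simp only [beq_iff_eq]; intro hh; omega)]
      rw [hsf]
      simp only [Bool.false_eq_true, if_false]
      rw [show ((acc.length : Int) - 1 + 1) = ((acc.length : Nat) : Int) by ring]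
      rw [get_possibilities_eq, hrf]
      have loop : ∀ (ys tl : List String), (∀ x ∈ ys, x ∈ rem) →
          acc.length + tl.length ≤ files.length →
          ∃ tail', ys.foldl (checkStep (fun o j => checkGo files (files.length : Int) fA o j)
                ((acc.length : Nat) : Int)) (none, acc ++ tl)
              = (ys.foldl (searchStep (fun a r t' => searchB (files.length : Int) fB a r t')
                  acc rem (bInitTarget acc)) none, acc ++ tail')
            ∧ acc.length + tail'.length ≤ files.length := by
        intro ys
        induction ys with
        | nil => intro tl _ htl; exact ⟨tl, rfl, htl⟩
        | cons x xs ihys =>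
          intro tl hmem htl
          have hx : x ∈ rem := hmem x List.mem_cons_self
          rw [List.foldl_cons, List.foldl_cons]
          -- facts shared by all live child branches
          have hrf' : bRemoveAll files (acc ++ [x]) = some (rem.erase x) := by
            rw [bRemoveAll_snoc, hrf]
            simp only [Option.bind_some]
            exact PySem.List.remove?_eq_some_erase rem x hx
          have hlen' : (acc ++ [x]).length + (rem.erase x).length = files.length := by
            simp; rw [List.length_erase_of_mem hx]; omega
          have htail' : (acc ++ [x]).length + tl.tail.length ≤ files.length := by
            simp only [List.length_append, List.length_singleton, List.length_tail]
            cases tl with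
            | nil => simp; omega
            | cons a b => simp at htl ⊢; omega
          have hfA' : (rem.erase x).length + 1 ≤ fA := by
            rw [List.length_erase_of_mem hx]; omega
          have hfB' : (rem.erase x).length + 1 ≤ fB := by
            rw [List.length_erase_of_mem hx]; omega
          -- the shared continuation once the branch recurses with new target nt and the
          -- child invariants hold
          have CONT : ∀ nt : Option String, bInitTarget (acc ++ [x]) = nt →
              allEqB (pairsOf (acc ++ [x])) = true →
              ∃ tail', xs.foldl (checkStep (fun o j => checkGo files (files.length : Int) fA o j)
                    ((acc.length : Nat) : Int))
                    (checkStep (fun o j => checkGo files (files.length : Int) fA o j)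
                      ((acc.length : Nat) : Int) (none, acc ++ tl) x)
                  = (xs.foldl (searchStep (fun a r t' => searchB (files.length : Int) fB a r t')
                      acc rem (bInitTarget acc))
                      (searchB (files.length : Int) fB (acc ++ [x]) (rem.erase x) nt), acc ++ tail')
                ∧ acc.length + tail'.length ≤ files.length := by
            intro nt hnt hgood'
            obtain ⟨tailC, hC, hCb⟩ := ih fA (acc ++ [x]) (rem.erase x) tl.tail
              hrf' hlen' htail' hdvd hgood' hfA' hfB'
            rw [hnt] at hC
            simp only [checkStep]
            rw [pyAssignOrAppend_eq]
            rw [show acc ++ [x] ++ tl.tail = (acc ++ [x]) ++ tl.tail from rfl]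
            rw [show ((acc.length : Nat) : Int) = (((acc ++ [x]).length : Int) - 1) by simp]
            rcases hres : searchB (files.length : Int) fB (acc ++ [x]) (rem.erase x) nt
              with _ | res
            · rw [hres] at hC
              rw [hC]
              simp only []
              rw [show (((acc ++ [x]).length : Int) - 1) = ((acc.length : Nat) : Int) by simp]
              rw [show (acc ++ [x]) ++ tailC = acc ++ ([x] ++ tailC) by simp]
              exact ihys ([x] ++ tailC) (fun y hy => hmem y (List.mem_cons_of_mem x hy))
                (by simp at hCb ⊢; omega)
            · rw [hres] at hC
              rw [hC]
              simp only []
              have hreslen := searchB_some_len fB (files.length : Int) (acc ++ [x])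
                (rem.erase x) nt res hres
              have hne2 : res.isEmpty = false := by
                rw [List.isEmpty_eq_false_iff_exists_mem]
                rcases res with _ | ⟨r0, rs⟩
                · simp at hreslen; omega
                · exact ⟨r0, List.mem_cons_self⟩
              rw [hne2]
              simp only [Bool.false_eq_true, if_false]
              rw [foldl_checkStep_some, foldl_searchStep_some]
              exact ⟨[x] ++ tailC, by simp, by simp at hCb ⊢; omega⟩
          -- evaluate B's step, branch on parity / target / pruning
          simp only [searchStep]
          by_cases hpar : acc.length % 2 = 0
          · have hp : (acc.length % 2 == 1) = false := by simp [hpar]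
            rw [hp]
            simp only [Bool.false_eq_true, if_false]
            rw [PySem.List.remove?_eq_some_erase rem x hx]
            have h1 : bInitTarget (acc ++ [x]) = bInitTarget acc :=
              bInitTarget_snoc acc x (by omega)
            have h2 : allEqB (pairsOf (acc ++ [x])) = true := by
              rw [pairsOf_snoc_even acc x hpar]; exact hgood
            exact CONT (bInitTarget acc) h1 h2
          · have hp : (acc.length % 2 == 1) = true := by
              simp only [beq_iff_eq]; omega
            rw [hp]
            simp only [if_true]
            have hne : acc ≠ [] := by intro he; subst he; simp at hpar
            have hlast : PySem.List.pyGetD acc (-1) "" = acc.getLast hne :=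
              PySem.List.pyGetD_neg_one acc "" hne
            rcases hpt : bInitTarget acc with _ | t
            · -- no target yet: acc = [a]
              have hacc1 : ∃ a, acc = [a] := by
                match acc, hpt, hpar with
                | [a], _, _ => exact ⟨a, rfl⟩
                | a :: b :: l, hpt, _ => simp [bInitTarget] at hpt
              obtain ⟨a, rfl⟩ := hacc1
              simp only []
              rw [PySem.List.remove?_eq_some_erase rem x hx]
              have h1 : bInitTarget ([a] ++ [x]) = some (PySem.List.pyGetD [a] (-1) "" ++ x) := by
                rw [hlast]; rfl
              have h2 : allEqB (pairsOf ([a] ++ [x])) = true := by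
                simp [pairsOf, allEqB]
              have := CONT _ h1 h2
              rw [hpt] at this
              exact this
            · obtain ⟨ps', hps⟩ := pairsOf_head_of_bInitTarget acc t hpt
              have hlen2 : acc.length ≠ 1 := by
                intro h1
                match acc, hpt, h1 with
                | [a], hpt, _ => simp [bInitTarget] at hpt
              have hsnoc : pairsOf (acc ++ [x]) = pairsOf acc ++ [acc.getLast hne ++ x] :=
                pairsOf_snoc_odd acc x hne (by omega)
              by_cases hprune : (PySem.List.pyGetD acc (-1) "" ++ x == t) = true
              · simp only [hprune, if_true]
                rw [PySem.List.remove?_eq_some_erase rem x hx]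
                have h1 : bInitTarget (acc ++ [x]) = some t := by
                  rw [bInitTarget_snoc acc x hlen2, hpt]
                have h2 : allEqB (pairsOf (acc ++ [x])) = true := by
                  rw [hsnoc, hps]
                  rw [hps] at hgood
                  simp only [List.cons_append, allEqB, List.all_append] at hgood ⊢
                  simp [hgood, ← hlast, beq_iff_eq.mp hprune]
                have := CONT (some t) h1 h2
                rw [hpt] at this
                exact this
              · have hpf : (PySem.List.pyGetD acc (-1) "" ++ x == t) = false := by
                  simp at hprune ⊢; exact hprune
                simp only [hpf, Bool.false_eq_true, if_false]
                -- A explores a dead branch, B skips it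
                have hbad' : allEqB (pairsOf (acc ++ [x])) = false := by
                  rw [hsnoc, hps]
                  simp only [List.cons_append, allEqB, List.all_append]
                  have : (acc.getLast hne ++ x == t) = false := by
                    rw [← hlast]; simp at hprune ⊢; exact hprune
                  simp [this]
                obtain ⟨tailC, hC, hCb⟩ := deadGo files fA (acc ++ [x]) (rem.erase x) tl.tail
                  hrf' hlen' htail' hdvd hbad' hfA'
                rw [show checkStep (fun o j => checkGo files (files.length : Int) fA o j)
                      ((acc.length : Nat) : Int) (none, acc ++ tl) x
                    = (none, (acc ++ [x]) ++ tailC) by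
                  simp only [checkStep]
                  rw [pyAssignOrAppend_eq]
                  rw [show acc ++ [x] ++ tl.tail = (acc ++ [x]) ++ tl.tail from rfl]
                  rw [show ((acc.length : Nat) : Int) = (((acc ++ [x]).length : Int) - 1) by simp]
                  rw [hC]]
                rw [show (acc ++ [x]) ++ tailC = acc ++ ([x] ++ tailC) by simp]
                have hnext := ihys ([x] ++ tailC)
                  (fun y hy => hmem y (List.mem_cons_of_mem x hy)) (by simp at hCb ⊢; omega)
                rw [hpt] at hnext
                exact hnext
      exact loop rem tail (fun x hx => hx) htail

lemma slice_zz (l : List String) (j : Int) (h : 0 ≤ j) :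
    PySem.List.slice l (some 0) (some j) = l.take j.toNat := by
  rw [PySem.List.slice_zero_start, PySem.List.slice_to l h]

lemma sf_false (o : List String) (k n : Int) (h : k ≠ n - 1) :
    solution_found o k n = false := by
  unfold solution_found
  rw [if_neg (by simp only [beq_iff_eq]; exact h)]

lemma bChainLoop_eq_solLoop (output : List String) (n : Int) : ∀ (fuel : Nat) (i : Int),
    bChainLoop output n fuel i = solLoop output n fuel i := by
  intro fuel
  induction fuel with
  | zero => intro i; rfl
  | succ f ih =>
    intro i
    rw [bChainLoop, solLoop]
    by_cases h : i < n - 2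
    · rw [if_pos h, if_pos h]
      rcases PySem.List.pyGet? output i with _ | a <;>
        rcases PySem.List.pyGet? output (i+1) with _ | b <;>
        rcases PySem.List.pyGet? output (i+2) with _ | c <;>
        rcases PySem.List.pyGet? output (i+3) with _ | d <;>
        simp only []
      by_cases hab : (a ++ b == c ++ d) = true
      · rw [if_pos hab, if_pos hab]
        exact ih (i + 2)
      · rw [if_neg hab, if_neg hab]
    · rw [if_neg h, if_neg h]

lemma chainAll_solLoop (output : List String) (n : Int) (h : ChainAll output n) :
    solLoop output n (n-2).toNat 0 = true := by
  rcases h with h2 | ⟨h3, hL, hall⟩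
  · cases hf : (n-2).toNat with
    | zero => rfl
    | succ f => rw [solLoop, if_neg (by omega)]
  · suffices H : ∀ (fuel : Nat) (i : Int), n - 2 - i ≤ 2 * (fuel : Int) → 0 ≤ i →
        (2 : Int) ∣ i → solLoop output n fuel i = true by
      exact H _ 0 (by omega) le_rfl ⟨0, by ring⟩
    intro fuel
    induction fuel with
    | zero => intro i _ _ _; rfl
    | succ f ih =>
      intro i hm h0 hev
      rw [solLoop]
      by_cases hlt : i < n - 2
      · rw [if_pos hlt]
        have hmem : i ∈ PySem.List.pyRange 0 (n-2) 2 := by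
          rw [PySem.List.mem_pyRange_iff_of_pos (by omega)]
          obtain ⟨c, hc⟩ := hev
          constructor
          · omega
          constructor
          · omega
          · refine ⟨c, by omega⟩
        have heq := hall i hmem
        have hrange : i + 3 < (output.length : Int) := by
          obtain ⟨c, hc⟩ := hev
          by_cases hpar : (2 : Int) ∣ n
          · rw [if_pos hpar] at hL
            obtain ⟨cn, hcn⟩ := hpar
            omega
          · rw [if_neg hpar] at hL
            have : ¬ (2 : Int) ∣ n := hpar
            omega
        have g0 : PySem.List.pyGet? output i = some (PySem.List.pyGetD output i "") := by
          rw [PySem.List.pyGet?_eq_some_getElem output (by omega) (by omega),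
              PySem.List.pyGetD_eq_getElem output "" (by omega) (by omega)]
        have g1 : PySem.List.pyGet? output (i+1) = some (PySem.List.pyGetD output (i+1) "") := by
          rw [PySem.List.pyGet?_eq_some_getElem output (by omega) (by omega),
              PySem.List.pyGetD_eq_getElem output "" (by omega) (by omega)]
        have g2 : PySem.List.pyGet? output (i+2) = some (PySem.List.pyGetD output (i+2) "") := by
          rw [PySem.List.pyGet?_eq_some_getElem output (by omega) (by omega),
              PySem.List.pyGetD_eq_getElem output "" (by omega) (by omega)]
        have g3 : PySem.List.pyGet? output (i+3) = some (PySem.List.pyGetD output (i+3) "") := by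
          rw [PySem.List.pyGet?_eq_some_getElem output (by omega) (by omega),
              PySem.List.pyGetD_eq_getElem output "" (by omega) (by omega)]
        rw [g0, g1, g2, g3]
        simp only []
        rw [if_pos (by simp [heq])]
        exact ih (i + 2) (by omega) (by omega)
          (by obtain ⟨c, hc⟩ := hev; exact ⟨c + 1, by omega⟩)
      · rw [if_neg hlt]

lemma immGo (files : List String) (n : Int) (fuel : Nat) (o : List String)
    (hf : 1 ≤ fuel) (hsf : solution_found o (n-1) n = true) :
    checkGo files n fuel o (n-1) = (some o, o) := by
  cases fuel with
  | zero => omega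
  | succ f => rw [checkGo, if_pos hsf]

lemma immEq (files output : List String) (n : Int) (h : ChainAll output n) :
    check_files files output (n-1) n = check_files_alt files output (n-1) n := by
  have hsl : solLoop output n (n-2).toNat 0 = true := chainAll_solLoop output n h
  have hsf : solution_found output (n-1) n = true := by
    unfold solution_found
    rw [if_pos (by simp), hsl]
  unfold check_files check_files_alt
  rw [immGo files n _ output (by omega) hsf]
  rw [if_pos (by rw [bChainLoop_eq_solLoop, hsl]; simp)]

lemma foldl_remove_none : ∀ (pre : List String),
    pre.foldl (fun acc0 f => acc0.bind (fun l => PySem.List.remove? l f))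
      (none : Option (List String)) = none := by
  intro pre
  induction pre with
  | nil => rfl
  | cons x xs ih => simpa using ih

lemma bRemoveAll_len : ∀ (pre fs rem : List String),
    bRemoveAll fs pre = some rem → rem.length + pre.length = fs.length := by
  intro pre
  induction pre with
  | nil =>
    intro fs rem h
    unfold bRemoveAll at h
    simp at h
    simp [h]
  | cons x xs ih =>
    intro fs rem h
    unfold bRemoveAll at h
    rw [List.foldl_cons] at h
    rcases hr : PySem.List.remove? fs x with _ | fs'
    · rw [show (some fs).bind (fun l => PySem.List.remove? l x) = none by simp [hr]] at h
      rw [foldl_remove_none] at h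
      simp at h
    · have hx : x ∈ fs := by
        by_contra hx
        rw [(PySem.List.remove?_eq_none_iff fs x).mpr hx] at hr
        simp at hr
      have hfs' : fs' = fs.erase x := by
        rw [PySem.List.remove?_eq_some_erase fs x hx] at hr
        injection hr with hr
        exact hr.symm
      rw [show (some fs).bind (fun l => PySem.List.remove? l x) = some fs' by simp [hr]] at h
      have hlen := ih fs' rem h
      have herl : fs'.length = fs.length - 1 := by
        rw [hfs']; exact List.length_erase_of_mem hx
      have hp : 1 ≤ fs.length := List.length_pos_of_mem hx
      simp at hlen ⊢
      omega

lemma msub_bRemoveAll : ∀ (pre fs : List String), MSub pre fs →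
    ∃ rem, bRemoveAll fs pre = some rem ∧ rem.length + pre.length = fs.length := by
  intro pre
  induction pre with
  | nil => intro fs _; exact ⟨fs, rfl, by simp⟩
  | cons x pre ih =>
    intro fs hms
    have hx : x ∈ fs := by
      have h1 := hms x List.mem_cons_self
      have h2 : 0 < (x :: pre).count x := by simp
      exact List.count_pos_iff.mp (by omega)
    have hms' : MSub pre (fs.erase x) := by
      intro y hy
      have h1 := hms y (List.mem_cons_of_mem x hy)
      by_cases hyx : y = x
      · subst hyx
        rw [List.count_erase_self]
        simp [List.count_cons_self] at h1
        omega
      · rw [List.count_erase_of_ne hyx]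
        rw [List.count_cons_of_ne (Ne.symm hyx)] at h1
        exact h1
    obtain ⟨rem, hra, hlen⟩ := ih (fs.erase x) hms'
    refine ⟨rem, ?_, ?_⟩
    · show (x :: pre).foldl (fun acc0 f => acc0.bind (fun l => PySem.List.remove? l f)) (some fs)
        = some rem
      rw [List.foldl_cons]
      rw [show (some fs).bind (fun l => PySem.List.remove? l x) = some (fs.erase x) by
        simp [PySem.List.remove?_eq_some_erase fs x hx]]
      exact hra
    · have := List.length_erase_of_mem hx
      have hfs : 1 ≤ fs.length := List.length_pos_of_mem hx
      simp at hlen ⊢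
      omega

lemma assign_general (o : List String) (j : Int) (x : String) (h0 : 0 ≤ j)
    (hl : j ≤ (o.length : Int)) :
    pyAssignOrAppend o j x = o.take j.toNat ++ x :: o.drop (j.toNat + 1) := by
  unfold pyAssignOrAppend
  by_cases hlt : j < (o.length : Int)
  · rw [show j = ((j.toNat : Nat) : Int) by omega,
      PySem.List.pySet?_natCast _ _ _ (by omega)]
    simp only [Int.toNat_natCast]
    rw [List.set_eq_take_append_cons_drop, if_pos (by omega)]
  · have hj : j = (o.length : Int) := by omega
    rw [show PySem.List.pySet? o j x = none by
      rw [PySem.List.pySet?_eq_none_iff]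
      unfold PySem.Raise.InRange
      omega]
    have : j.toNat = o.length := by omega
    simp [this]

lemma deadN (files : List String) (n : Int) : ∀ (fuel : Nat) (o : List String) (k : Int)
    (rem : List String),
    -1 ≤ k → k + 1 ≤ (o.length : Int) →
    bRemoveAll files (PySem.List.slice o (some 0) (some (k+1))) = some rem →
    (n ≤ k ∨ (k + 2 ≤ n ∧ (files.length : Int) + 1 ≤ n)) →
    rem.length + 1 ≤ fuel →
    ∃ o2, checkGo files n fuel o k = (none, o2) ∧
      PySem.List.slice o2 (some 0) (some (k+1)) = PySem.List.slice o (some 0) (some (k+1)) ∧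
      o.length ≤ o2.length := by
  intro fuel
  induction fuel with
  | zero => intro o k rem _ _ _ _ hf; omega
  | succ f ih =>
    intro o k rem hk1 hkL hra hC hf
    have hkn : k ≠ n - 1 := by rcases hC with h | ⟨h1, h2⟩ <;> omega
    rw [checkGo, sf_false o k n hkn]
    simp only [Bool.false_eq_true, if_false]
    rw [show get_possibilities files o (k+1)
        = bRemoveAll files (PySem.List.slice o (some 0) (some (k+1))) from rfl, hra]
    -- length bookkeeping
    have hslen : (PySem.List.slice o (some 0) (some (k+1))).length = (k+1).toNat := by
      rw [slice_zz _ _ (by omega)]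
      simp
      omega
    have hrem_len : rem.length + (k+1).toNat = files.length := by
      have h2 := bRemoveAll_len _ _ _ hra
      omega
    have loop : ∀ (ys : List String) (oc : List String), (∀ x ∈ ys, x ∈ rem) →
        PySem.List.slice oc (some 0) (some (k+1)) = PySem.List.slice o (some 0) (some (k+1)) →
        o.length ≤ oc.length →
        ∃ o2, ys.foldl (checkStep (fun o' j => checkGo files n f o' j) (k+1)) (none, oc)
            = (none, o2) ∧
          PySem.List.slice o2 (some 0) (some (k+1)) = PySem.List.slice o (some 0) (some (k+1)) ∧
          o.length ≤ o2.length := by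
      intro ys
      induction ys with
      | nil => intro oc _ hs hl; exact ⟨oc, rfl, hs, hl⟩
      | cons x xs ihys =>
        intro oc hmem hs hl
        have hx : x ∈ rem := hmem x List.mem_cons_self
        have hkoc : k + 1 ≤ (oc.length : Int) := by omega
        -- the assigned list
        have hasg := assign_general oc (k+1) x (by omega) hkoc
        set oc' := pyAssignOrAppend oc (k+1) x with hoc'
        have hoc'_eq : oc' = oc.take (k+1).toNat ++ x :: oc.drop ((k+1).toNat + 1) := hasg
        have hlen' : (k+1) + 1 ≤ (oc'.length : Int) := by
          rw [hoc'_eq]; simp; omega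
        have hslice1 : PySem.List.slice oc' (some 0) (some (k+1))
            = PySem.List.slice oc (some 0) (some (k+1)) := by
          rw [slice_zz _ _ (by omega), slice_zz _ _ (by omega), hoc'_eq]
          rw [List.take_append_of_le_length (by simp; omega)]
          rw [List.take_take]
          congr 1
          omega
        have hslice2 : PySem.List.slice oc' (some 0) (some (k+1+1))
            = PySem.List.slice oc (some 0) (some (k+1)) ++ [x] := by
          rw [slice_zz _ _ (by omega), slice_zz _ _ (by omega), hoc'_eq]
          have h1 : (k+1+1).toNat = (k+1).toNat + 1 := by omega
          rw [h1]
          rw [show (k+1).toNat + 1 = (oc.take (k+1).toNat).length + 1 by simp; omega]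
          rw [List.take_length_add_append]
          simp
        have hra' : bRemoveAll files (PySem.List.slice oc' (some 0) (some (k+1+1)))
            = some (rem.erase x) := by
          rw [hslice2, hs, bRemoveAll_snoc, hra]
          simp only [Option.bind_some]
          exact PySem.List.remove?_eq_some_erase rem x hx
        have hC' : n ≤ (k+1) ∨ ((k+1) + 2 ≤ n ∧ (files.length : Int) + 1 ≤ n) := by
          rcases hC with h | ⟨h1, h2⟩
          · left; omega
          · right
            constructor
            · have hr1 : 1 ≤ rem.length := List.length_pos_of_mem hx
              omega
            · exact h2
        have herl : (rem.erase x).length = rem.length - 1 := List.length_erase_of_mem hx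
        have hr1 : 1 ≤ rem.length := List.length_pos_of_mem hx
        obtain ⟨o2, hgo, hsl2, hlen2⟩ := ih oc' (k+1) (rem.erase x) (by omega) hlen' hra'
          hC' (by omega)
        rw [List.foldl_cons]
        simp only [checkStep]
        rw [← hoc', hgo]
        simp only []
        have hsl2' : PySem.List.slice o2 (some 0) (some (k+1))
            = PySem.List.slice o (some 0) (some (k+1)) := by
          have t1 : PySem.List.slice o2 (some 0) (some (k+1))
              = (PySem.List.slice o2 (some 0) (some (k+1+1))).take (k+1).toNat := by
            rw [slice_zz _ _ (by omega), slice_zz _ _ (by omega), List.take_take]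
            congr 1
            omega
          have t2 : PySem.List.slice oc' (some 0) (some (k+1))
              = (PySem.List.slice oc' (some 0) (some (k+1+1))).take (k+1).toNat := by
            rw [slice_zz _ _ (by omega), slice_zz _ _ (by omega), List.take_take]
            congr 1
            omega
          rw [t1, hsl2, ← t2, hslice1, hs]
        have hlen3 : o.length ≤ o2.length := by
          have : oc.length ≤ oc'.length := by
            rw [hoc'_eq]; simp; omega
          omega
        exact ihys o2 (fun y hy => hmem y (List.mem_cons_of_mem x hy)) hsl2' hlen3
    exact loop rem o (fun x hx => hx) rfl le_rfl

lemma aeGo (files : List String) (n : Int) (fuel : Nat) (o : List String) (k : Int)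
    (hf : 1 ≤ fuel) (hk : n ≠ k + 1)
    (hposs : bRemoveAll files (PySem.List.slice o (some 0) (some (k+1))) = some []) :
    (checkGo files n fuel o k).1 = none := by
  cases fuel with
  | zero => omega
  | succ f =>
    rw [checkGo, sf_false o k n (by omega)]
    simp only [Bool.false_eq_true, if_false]
    rw [show get_possibilities files o (k+1)
        = bRemoveAll files (PySem.List.slice o (some 0) (some (k+1))) from rfl, hposs]
    rfl

-- ===== VERDICT (by name: the statement is the Claim_ definition above) =====
theorem check_files_spec : Claim_equal_check_files := by
  intro files output k n _hdom hpre
  unfold Spec_check_files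
  rcases hpre with ⟨hk1, hkL, hLn, hn, hdvd, hms⟩ | ⟨hk, hch⟩ | ⟨hk1, hkL, hms, hC⟩ | ⟨hk1, hms, hp, hn1, hn2⟩
  · -- R1: a well-formed (possibly resumed) search state
    subst hn
    have hd2 : 2 ∣ files.length := by
      rcases hdvd with ⟨c, hc⟩
      have : (files.length : Int) = 2 * c := hc
      omega
    set acc := output.take (k+1).toNat with hacc_def
    set tail := output.drop (k+1).toNat with htail_def
    have hsl : PySem.List.slice output (some 0) (some (k+1)) = acc :=
      slice_zz _ _ (by omega)
    have hout : output = acc ++ tail := (List.take_append_drop _ _).symm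
    have hacclen : acc.length = (k+1).toNat := by
      rw [hacc_def, List.length_take]
      omega
    have hk_eq : ((acc.length : Int)) - 1 = k := by
      rw [hacclen]; omega
    rw [hsl] at hms
    obtain ⟨rem, hra, hremlen⟩ := msub_bRemoveAll acc files hms
    have htaillen : acc.length + tail.length ≤ files.length := by
      have h1 : acc.length + tail.length = output.length := by
        rw [hacc_def, htail_def]; simp; omega
      omega
    by_cases hgood : allEqB (pairsOf acc) = true
    · -- consistent prefix: both sides are the pruned search
      by_cases hguard : ((k == (files.length : Int) - 1)
          && bChainLoop output (files.length : Int) ((files.length : Int) - 2).toNat 0) = true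
      · -- the state is already a complete valid arrangement
        simp only [Bool.and_eq_true, beq_iff_eq] at hguard
        obtain ⟨hkn, hbc⟩ := hguard
        have hsf : solution_found output ((files.length : Int) - 1) (files.length : Int) = true := by
          unfold solution_found
          rw [if_pos (by simp)]
          rw [← bChainLoop_eq_solLoop]
          exact hbc
        unfold check_files check_files_alt
        rw [hkn]
        rw [immGo files (files.length : Int) _ output (by omega) hsf]
        rw [if_pos (by simp [hbc])]
      · unfold check_files check_files_alt
        rw [if_neg (by intro hh; exact hguard hh)]
        simp only [hsl, hra]
        rw [show (!(allEqB (pairsOf acc))) = false by simp [hgood]]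
        simp only [Bool.false_eq_true, if_false]
        rw [head_pairsOf]
        obtain ⟨tail', heq, _⟩ := liveGo files (rem.length + 1)
          (k.natAbs + 2 * files.length + output.length + 4) acc rem tail
          hra (by omega) htaillen hd2 hgood (by omega) (by omega)
        rw [hk_eq, ← hout] at heq
        rw [heq]
    · -- inconsistent prefix: both sides are None
      have hgoodf : allEqB (pairsOf acc) = false := by
        cases h : allEqB (pairsOf acc)
        · rfl
        · exact absurd h hgood
      have hguard : ((k == (files.length : Int) - 1)
          && bChainLoop output (files.length : Int) ((files.length : Int) - 2).toNat 0) = false := by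
        by_cases hkn : k = (files.length : Int) - 1
        · -- then output = acc and the chain is false
          have hlenout : output.length = files.length := by
            have h1 : k + 1 ≤ (output.length : Int) := hkL
            have h2 : (output.length : Int) ≤ (files.length : Int) := hLn
            omega
          have htail0 : tail = [] := by
            rw [htail_def]
            apply List.drop_eq_nil_of_le
            omega
          have houtacc : output = acc := by rw [hout, htail0]; simp
          have hbc : bChainLoop output (files.length : Int) ((files.length : Int) - 2).toNat 0
              = false := by
            rw [bChainLoop_eq_solLoop]
            have hs := solLoop_eq (((output.length : Int) - 2).toNat) output []
              (by simp; omega) (by simp) (by omega)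
            simp only [List.nil_append, List.length_nil, Nat.zero_add, Nat.cast_zero] at hs
            rw [show (files.length : Int) = ((output.length : Nat) : Int) by rw [hlenout]]
            rw [hs, adjPairs_eq_allEqB, houtacc]
            exact hgoodf
          simp [hbc]
        · simp only [Bool.and_eq_false_iff]
          left
          simp only [beq_eq_false_iff_ne, ne_eq]
          exact hkn
      unfold check_files check_files_alt
      rw [hguard]
      simp only [Bool.false_eq_true, if_false]
      simp only [hsl, hra]
      rw [show (!(allEqB (pairsOf acc))) = true by simp [hgoodf]]
      simp only [if_true]
      obtain ⟨tail', heq, _⟩ := deadGo files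
        (k.natAbs + 2 * files.length + output.length + 4) acc rem tail
        hra (by omega) htaillen hd2 hgoodf (by omega)
      rw [hk_eq, ← hout] at heq
      rw [heq]
  · -- IMM: the state is already a complete valid arrangement; both return output
    subst hk
    exact immEq files output n hch
  · -- NN: n outside the reachable slot window; both return None
    obtain ⟨rem, hra, hlen⟩ := msub_bRemoveAll _ _ hms
    have hslen : (PySem.List.slice output (some 0) (some (k+1))).length = (k+1).toNat := by
      rw [slice_zz _ _ (by omega)]
      simp
      omega
    have hA : (checkGo files n (k.natAbs + 2 * files.length + output.length + 4)
        output k).1 = none := by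
      obtain ⟨o2, hgo, _, _⟩ := deadN files n
        (k.natAbs + 2 * files.length + output.length + 4) output k rem hk1 hkL hra hC
        (by omega)
      rw [hgo]
    unfold check_files check_files_alt
    rw [hA]
    rw [if_neg (by
      simp only [Bool.and_eq_true, beq_iff_eq]
      intro ⟨h1, _⟩
      rcases hC with h | ⟨h2, h3⟩ <;> omega)]
    simp only [hra]
    by_cases hb : allEqB (pairsOf (PySem.List.slice output (some 0) (some (k+1)))) = true
    · rw [show (!(allEqB (pairsOf (PySem.List.slice output (some 0) (some (k+1)))))) = false by
        rw [hb]; rfl]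
      simp only [Bool.false_eq_true, if_false]
      rcases hC with h | ⟨h2, h3⟩
      · rw [searchB_none_gt _ n _ _ _ (by rw [hslen]; omega)]
      · rw [searchB_none_sum _ n _ _ _ (by rw [hslen]; omega)]
    · have hbf : allEqB (pairsOf (PySem.List.slice output (some 0) (some (k+1)))) = false := by
        cases h : allEqB (pairsOf (PySem.List.slice output (some 0) (some (k+1))))
        · rfl
        · exact absurd h hb
      rw [show (!(allEqB (pairsOf (PySem.List.slice output (some 0) (some (k+1)))))) = true by
        rw [hbf]; rfl]
      simp only [if_true]
  · -- AE: the pool is already exhausted; both return None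
    obtain ⟨rem, hra, hlen⟩ := msub_bRemoveAll _ _ hms
    have hrem0 : rem = [] := List.eq_nil_of_length_eq_zero (by omega)
    subst hrem0
    unfold check_files check_files_alt
    rw [aeGo files n _ output k (by omega) hn1 hra]
    rw [if_neg (by
      simp only [Bool.and_eq_true, beq_iff_eq]
      intro ⟨h1, _⟩
      omega)]
    simp only [hra]
    by_cases hb : allEqB (pairsOf (PySem.List.slice output (some 0) (some (k+1)))) = true
    · rw [show (!(allEqB (pairsOf (PySem.List.slice output (some 0) (some (k+1)))))) = false by
        rw [hb]; rfl]
      simp only [Bool.false_eq_true, if_false, List.length_nil]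
      rw [searchB]
      rw [if_neg (by simp only [beq_iff_eq]; intro hh; exact hn2 hh.symm)]
      rw [if_pos (by simp)]
    · have hbf : allEqB (pairsOf (PySem.List.slice output (some 0) (some (k+1)))) = false := by
        cases h : allEqB (pairsOf (PySem.List.slice output (some 0) (some (k+1))))
        · rfl
        · exact absurd h hb
      rw [show (!(allEqB (pairsOf (PySem.List.slice output (some 0) (some (k+1)))))) = true by
        rw [hbf]; rfl]
      simp only [if_true]
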